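-- pv_equiv track=rewrite | github.com/dhamodhar1142/clinical-outcomes-explorer | src/dataset_intelligence.py | _support_for_fields
-- ===== SOURCE A (Python) =====
-- def _support_for_fields(fields: list[str], canonical_map: dict[str, str], synthetic_fields: set[str], inferred_fields: set[str]) -> str:
--     if not fields:
--         return "unavailable"
--     matches = [field for field in fields if field in canonical_map]
--     if not matches:
--         return "unavailable"
--     if any(field in synthetic_fields for field in matches):
--         return "synthetic-assisted"
--     if any(field in inferred_fields for field in matches):
--         return "inferred"
--     return "native"
-- ===== SOURCE B (Python) =====
-- def _support_for_fields(fields: list[str], canonical_map: dict[str, str], synthetic_fields: set[str], inferred_fields: set[str]) -> str: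
--     matched = canonical_map.keys() & set(fields)
--     if not matched:
--         return "unavailable"
--     best = max(2 if f in synthetic_fields else 1 if f in inferred_fields else 0 for f in matched)
--     return ("native", "inferred", "synthetic-assisted")[best]
-- ===== Notes on version B (the rewrite author's own statement) =====
-- stated objective: alternative
-- what changed: Replaces list filtering plus staged any() priority checks by a set intersection of the dict's keys with set(fields) followed by a numeric max of per-field support scores (2=synthetic, 1=inferred, 0=native), indexing the answer tuple by that maximum.
import Mathlib
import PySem

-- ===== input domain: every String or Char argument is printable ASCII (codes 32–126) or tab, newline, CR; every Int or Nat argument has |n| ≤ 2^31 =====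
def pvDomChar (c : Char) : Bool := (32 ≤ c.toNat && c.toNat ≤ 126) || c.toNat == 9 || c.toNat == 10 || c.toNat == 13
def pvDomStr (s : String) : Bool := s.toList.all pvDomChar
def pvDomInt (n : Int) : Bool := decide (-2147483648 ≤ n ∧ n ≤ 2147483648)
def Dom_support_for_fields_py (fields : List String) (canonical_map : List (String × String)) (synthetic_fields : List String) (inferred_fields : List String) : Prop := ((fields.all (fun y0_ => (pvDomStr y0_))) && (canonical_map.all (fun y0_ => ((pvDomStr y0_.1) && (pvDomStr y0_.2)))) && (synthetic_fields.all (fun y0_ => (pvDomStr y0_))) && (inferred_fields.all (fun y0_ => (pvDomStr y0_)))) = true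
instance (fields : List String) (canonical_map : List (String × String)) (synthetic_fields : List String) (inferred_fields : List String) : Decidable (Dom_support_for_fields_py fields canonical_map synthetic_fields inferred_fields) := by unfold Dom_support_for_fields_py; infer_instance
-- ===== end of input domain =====

-- ===== PORT A =====
-- B replaces A's filter-then-rescan passes by a key-set ∩ field-set intersection and a max of
-- per-field support scores (2 synthetic, 1 inferred, 0 native); return value only, no mutation.
def support_for_fields_py (fields : List String) (canonical_map : List (String × String)) (synthetic_fields : List String) (inferred_fields : List String) : String :=
  if fields.isEmpty then "unavailable"
  else
    let matchesA := fields.filter (fun field => canonical_map.any (fun kv => kv.1 == field))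
    if matchesA.isEmpty then "unavailable"
    else if matchesA.any (fun field => synthetic_fields.contains field) then "synthetic-assisted"
    else if matchesA.any (fun field => inferred_fields.contains field) then "inferred"
    else "native"

-- ===== PORT B =====
def support_for_fields_py_alt (fields : List String) (canonical_map : List (String × String)) (synthetic_fields : List String) (inferred_fields : List String) : String :=
  let matched : PySem.Set String :=
    PySem.Set.inter (PySem.Set.ofList (canonical_map.map Prod.fst)) (PySem.Set.ofList fields)
  if matched.isEmpty then "unavailable"
  else
    match PySem.List.max? (matched.map (fun f =>
        if synthetic_fields.contains f then (2 : Int)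
        else if inferred_fields.contains f then 1 else 0)) (fun x => x) with
    | none => "unavailable"  -- unreachable: matched is nonempty
    | some best => PySem.List.pyGetD ["native", "inferred", "synthetic-assisted"] best "unavailable"

-- ===== PRECONDITION & SPEC =====
def Spec_support_for_fields_py (fields : List String) (canonical_map : List (String × String)) (synthetic_fields : List String) (inferred_fields : List String) (out : String) : Prop := out = support_for_fields_py_alt fields canonical_map synthetic_fields inferred_fields
instance (fields : List String) (canonical_map : List (String × String)) (synthetic_fields : List String) (inferred_fields : List String) (out : String) : Decidable (Spec_support_for_fields_py fields canonical_map synthetic_fields inferred_fields out) := by unfold Spec_support_for_fields_py; infer_instance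

-- ===== CLAIM (what is proved, stated in full; the proofs are below) =====
def Claim_equal_support_for_fields_py : Prop := ∀ (fields : List String) (canonical_map : List (String × String)) (synthetic_fields : List String) (inferred_fields : List String), Dom_support_for_fields_py fields canonical_map synthetic_fields inferred_fields → Spec_support_for_fields_py fields canonical_map synthetic_fields inferred_fields (support_for_fields_py fields canonical_map synthetic_fields inferred_fields)

-- ===== LEMMAS AND PROOFS =====

-- membership in B's intersection set
lemma pv_mem_matched (fields : List String) (canonical_map : List (String × String)) (f : String) :
    f ∈ PySem.Set.inter (PySem.Set.ofList (canonical_map.map Prod.fst)) (PySem.Set.ofList fields)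
      ↔ (f ∈ fields ∧ ∃ kv ∈ canonical_map, kv.1 = f) := by
  rw [PySem.Set.mem_inter, PySem.Set.mem_ofList, PySem.Set.mem_ofList, List.mem_map]
  aesop

-- ===== VERDICT (by name: the statement is the Claim_ definition above) =====
theorem support_for_fields_py_spec : Claim_equal_support_for_fields_py := by
  intro fields canonical_map syn inf _
  unfold Spec_support_for_fields_py support_for_fields_py support_for_fields_py_alt
  set matched := PySem.Set.inter (PySem.Set.ofList (canonical_map.map Prod.fst)) (PySem.Set.ofList fields) with hmatched
  by_cases hM : ∃ f ∈ fields, ∃ kv ∈ canonical_map, kv.1 = f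
  · -- there is a match: both sides pass their "unavailable" guards
    have hmem : ∀ f, f ∈ fields.filter (fun field => canonical_map.any (fun kv => kv.1 == field)) ↔ f ∈ matched := by
      intro f
      rw [List.mem_filter, hmatched, pv_mem_matched]
      simp [List.any_eq_true, beq_iff_eq, and_comm]
    have hmne : matched ≠ [] := by
      obtain ⟨f, hf, hk⟩ := hM
      intro h
      have : f ∈ matched := (pv_mem_matched fields canonical_map f).mpr ⟨hf, hk⟩
      simp [h] at this
    have hfne : fields.isEmpty = false := by
      obtain ⟨f, hf, _⟩ := hM
      cases fields <;> simp_all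
    have hfilne : (fields.filter (fun field => canonical_map.any (fun kv => kv.1 == field))).isEmpty = false := by
      rw [List.isEmpty_eq_false_iff]
      intro h
      obtain ⟨f, hf, kv, hkv, hkv1⟩ := hM
      have : f ∈ fields.filter (fun field => canonical_map.any (fun kv => kv.1 == field)) :=
        (hmem f).mpr ((pv_mem_matched fields canonical_map f).mpr ⟨hf, kv, hkv, hkv1⟩)
      simp [h] at this
    have hmB : matched.isEmpty = false := by rw [List.isEmpty_eq_false_iff]; exact hmne
    have hsne : matched.map (fun f =>
        if syn.contains f then (2 : Int) else if inf.contains f then 1 else 0) ≠ [] := by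
      simp [hmne]
    obtain ⟨best, hbest⟩ : ∃ b, PySem.List.max? (matched.map (fun f =>
        if syn.contains f then (2 : Int) else if inf.contains f then 1 else 0)) (fun x => x) = some b := by
      cases h : PySem.List.max? (matched.map (fun f =>
          if syn.contains f then (2 : Int) else if inf.contains f then 1 else 0)) (fun x => x) with
      | none => exact absurd ((PySem.List.max?_eq_none_iff _ _).mp h) hsne
      | some b => exact ⟨b, rfl⟩
    have hbmem := PySem.List.max?_mem hbest
    have hbmax := PySem.List.max?_isMax hbest
    obtain ⟨g, hg, hgsc⟩ := List.mem_map.mp hbmem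
    simp only [hfne, hmB, Bool.false_eq_true, if_false, hbest]
    by_cases hS : ∃ f ∈ matched, syn.contains f = true
    · -- synthetic
      obtain ⟨f, hf, hfs⟩ := hS
      have h2 : (2 : Int) ≤ best := by
        have : (2 : Int) ∈ matched.map (fun f =>
            if syn.contains f then (2 : Int) else if inf.contains f then 1 else 0) :=
          List.mem_map.mpr ⟨f, hf, by rw [if_pos hfs]⟩
        simpa using hbmax _ this
      have hle : best ≤ 2 := by rw [← hgsc]; split_ifs <;> omega
      have hb2 : best = 2 := le_antisymm hle h2
      have hA : (fields.filter (fun field => canonical_map.any (fun kv => kv.1 == field))).any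
          (fun field => syn.contains field) = true := by
        rw [List.any_eq_true]
        exact ⟨f, (hmem f).mpr hf, hfs⟩
      rw [if_neg (by rw [List.isEmpty_eq_false_iff] at hfilne; simp [hfilne]), if_pos hA, hb2]
      decide
    · have hnoS : ∀ f ∈ matched, syn.contains f = false := by
        intro f hf
        by_contra h
        exact hS ⟨f, hf, by simpa using h⟩
      have hAS : (fields.filter (fun field => canonical_map.any (fun kv => kv.1 == field))).any
          (fun field => syn.contains field) = false := by
        rw [Bool.eq_false_iff]
        intro h
        obtain ⟨f, hf, hfs⟩ := List.any_eq_true.mp h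
        rw [hnoS f ((hmem f).mp hf)] at hfs
        exact Bool.false_ne_true hfs
      by_cases hI : ∃ f ∈ matched, inf.contains f = true
      · -- inferred
        obtain ⟨f, hf, hfi⟩ := hI
        have h1 : (1 : Int) ≤ best := by
          have : (1 : Int) ∈ matched.map (fun f =>
              if syn.contains f then (2 : Int) else if inf.contains f then 1 else 0) :=
            List.mem_map.mpr ⟨f, hf, by rw [if_neg (by rw [hnoS f hf]; simp), if_pos hfi]⟩
          simpa using hbmax _ this
        have hle : best ≤ 1 := by rw [← hgsc, if_neg (by rw [hnoS g hg]; simp)]; split_ifs <;> omega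
        have hb1 : best = 1 := le_antisymm hle h1
        have hAI : (fields.filter (fun field => canonical_map.any (fun kv => kv.1 == field))).any
            (fun field => inf.contains field) = true := by
          rw [List.any_eq_true]
          exact ⟨f, (hmem f).mpr hf, hfi⟩
        rw [if_neg (by rw [List.isEmpty_eq_false_iff] at hfilne; simp [hfilne]), if_neg (by rw [hAS]; simp), if_pos hAI, hb1]
        decide
      · -- native
        have hnoI : ∀ f ∈ matched, inf.contains f = false := by
          intro f hf
          by_contra h
          exact hI ⟨f, hf, by simpa using h⟩
        have hb0 : best = 0 := by rw [← hgsc, if_neg (by rw [hnoS g hg]; simp), if_neg (by rw [hnoI g hg]; simp)]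
        have hAI : (fields.filter (fun field => canonical_map.any (fun kv => kv.1 == field))).any
            (fun field => inf.contains field) = false := by
          rw [Bool.eq_false_iff]
          intro h
          obtain ⟨f, hf, hfi⟩ := List.any_eq_true.mp h
          rw [hnoI f ((hmem f).mp hf)] at hfi
          exact Bool.false_ne_true hfi
        rw [if_neg (by rw [List.isEmpty_eq_false_iff] at hfilne; simp [hfilne]), if_neg (by rw [hAS]; simp), if_neg (by rw [hAI]; simp), hb0]
        decide
  · -- no match: both "unavailable"
    have hmnil : matched = [] := by
      rw [List.eq_nil_iff_forall_not_mem]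
      intro f hf
      exact hM ⟨f, ((pv_mem_matched fields canonical_map f).mp hf).1,
        ((pv_mem_matched fields canonical_map f).mp hf).2⟩
    have hfil : fields.filter (fun field => canonical_map.any (fun kv => kv.1 == field)) = [] := by
      rw [List.filter_eq_nil_iff]
      intro f hf hc
      simp only [List.any_eq_true, beq_iff_eq] at hc
      exact hM ⟨f, hf, hc⟩
    by_cases hfe : fields.isEmpty <;> simp [hfe, hfil, hmnil]
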